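-- pv_equiv track=rewrite | github.com/SDelhey/AdventOfCode2021 | day9/__main__.py | explore_for_basis
-- ===== SOURCE A (Python) =====
-- import functools
-- from typing import List
--
-- def check_adjacent_numbers(all_numbers: List[List[int]], i: int, j: int) -> bool:
--     current_value = all_numbers[i][j]
--
--     if len(all_numbers) >= i + 2 and all_numbers[i + 1][j] <= current_value:
--         return False
--
--     if i > 0 and all_numbers[i - 1][j] <= current_value:
--         return False
--
--     if len(all_numbers[i]) >= j + 2 and all_numbers[i][j + 1] <= current_value:
--         return False
--
--     if j > 0 and all_numbers[i][j - 1] <= current_value: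
--         return False
--     return True
--
-- def explore_for_basis(all_numbers):
--     low_points = [(i, j) for i in range(len(all_numbers)) for j in range(len(all_numbers[0])) if check_adjacent_numbers(all_numbers, i, j)]
--     results = []
--
--     for low_point in low_points:
--         current_value = all_numbers[low_point[0]][low_point[1]]
--         already_visited_points = {low_point}
--
--         __explore_for_basis(all_numbers, current_value, low_point[0] + 1, low_point[1], already_visited_points)
--         __explore_for_basis(all_numbers, current_value, low_point[0] - 1, low_point[1], already_visited_points)
--         __explore_for_basis(all_numbers, current_value, low_point[0], low_point[1] + 1, already_visited_points)
--         __explore_for_basis(all_numbers, current_value, low_point[0], low_point[1] - 1, already_visited_points)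
--
--         results.append(len(already_visited_points))
--
--     return functools.reduce(lambda x, y: x * y, sorted(results)[-3:])
--
-- def __is_part_of_basin(old_value, current_value):
--     if current_value == 9:
--         return False
--
--     if current_value > old_value:
--         return True
--
--     return False
--
-- def index_out_of_bounds(all_numbers, i, j):
--     if i < 0 or j < 0 or i + 1 > len(all_numbers) or j + 1 > len(all_numbers[i]):
--         return True
--     return False
--
-- def __explore_for_basis(all_numbers, old_value, i, j, already_visited):
--     if index_out_of_bounds(all_numbers, i, j) or not __is_part_of_basin(old_value, all_numbers[i][j]) or (i, j) in already_visited: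
--         return
--
--     current_value = all_numbers[i][j]
--     already_visited.add((i, j))
--
--     __explore_for_basis(all_numbers, current_value, i + 1, j, already_visited)
--     __explore_for_basis(all_numbers, current_value, i - 1, j, already_visited)
--     __explore_for_basis(all_numbers, current_value, i, j + 1, already_visited)
--     __explore_for_basis(all_numbers, current_value, i, j - 1, already_visited)
--
--     return
-- ===== SOURCE B (Python) =====
-- import functools
-- from typing import List
--
-- def check_adjacent_numbers(all_numbers: List[List[int]], i: int, j: int) -> bool:
--     # low-point detection kept unchanged from the original
--     current_value = all_numbers[i][j]
--     if len(all_numbers) >= i + 2 and all_numbers[i + 1][j] <= current_value: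
--         return False
--     if i > 0 and all_numbers[i - 1][j] <= current_value:
--         return False
--     if len(all_numbers[i]) >= j + 2 and all_numbers[i][j + 1] <= current_value:
--         return False
--     if j > 0 and all_numbers[i][j - 1] <= current_value:
--         return False
--     return True
--
-- def index_out_of_bounds(all_numbers, i, j):
--     if i < 0 or j < 0 or i + 1 > len(all_numbers) or j + 1 > len(all_numbers[i]):
--         return True
--     return False
--
-- def explore_for_basis(all_numbers):
--     low_points = [(i, j) for i in range(len(all_numbers)) for j in range(len(all_numbers[0])) if check_adjacent_numbers(all_numbers, i, j)]
--     results = []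
--     for (li, lj) in low_points:
--         low_value = all_numbers[li][lj]
--         visited = {(li, lj)}
--         # iterative flood fill: explicit stack instead of recursion
--         stack = [((li, lj - 1), low_value), ((li, lj + 1), low_value),
--                  ((li - 1, lj), low_value), ((li + 1, lj), low_value)]
--         while stack:
--             (x, y), old_value = stack.pop()
--             if index_out_of_bounds(all_numbers, x, y):
--                 continue
--             current_value = all_numbers[x][y]
--             if current_value == 9 or current_value <= old_value or (x, y) in visited:
--                 continue
--             visited.add((x, y))
--             stack.extend([((x, y - 1), current_value), ((x, y + 1), current_value),
--                           ((x - 1, y), current_value), ((x + 1, y), current_value)])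
--         results.append(len(visited))
--     return functools.reduce(lambda x, y: x * y, sorted(results)[-3:])
-- ===== Notes on version B (the rewrite author's own statement) =====
-- stated objective: alternative
-- what changed: The four recursive seed calls plus the recursive __explore_for_basis helper are replaced by a single iterative flood fill per low point using an explicit stack of (cell, threshold) frames; low-point detection and the top-3 product are kept unchanged.
import Mathlib
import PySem

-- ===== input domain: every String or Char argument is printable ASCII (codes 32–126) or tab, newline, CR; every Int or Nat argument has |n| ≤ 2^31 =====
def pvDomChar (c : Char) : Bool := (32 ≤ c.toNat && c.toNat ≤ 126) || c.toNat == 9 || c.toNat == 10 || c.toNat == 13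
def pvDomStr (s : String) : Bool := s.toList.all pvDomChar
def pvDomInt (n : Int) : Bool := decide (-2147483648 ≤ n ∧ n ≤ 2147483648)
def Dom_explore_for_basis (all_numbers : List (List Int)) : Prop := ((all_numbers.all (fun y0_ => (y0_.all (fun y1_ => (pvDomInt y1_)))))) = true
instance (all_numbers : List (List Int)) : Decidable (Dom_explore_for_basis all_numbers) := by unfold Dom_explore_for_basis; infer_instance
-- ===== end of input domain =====

-- B replaces A's four-way recursive flood fill by a single iterative explicit-stack flood fill
-- per low point (low-point detection and the top-3 product are unchanged); objective: alternative.

-- ===== PORT A =====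
-- all_numbers[i][j]; both ports only evaluate it where both indices are in range, where pyGetD is exact
def pvCell (g : List (List Int)) (i j : Int) : Int :=
  PySem.List.pyGetD (PySem.List.pyGetD g i []) j 0

def check_adjacent_numbers (g : List (List Int)) (i j : Int) : Bool :=
  let cur := pvCell g i j
  if (g.length : Int) ≥ i + 2 ∧ pvCell g (i + 1) j ≤ cur then false
  else if i > 0 ∧ pvCell g (i - 1) j ≤ cur then false
  else if PySem.List.len (PySem.List.pyGetD g i []) ≥ j + 2 ∧ pvCell g i (j + 1) ≤ cur then false
  else if j > 0 ∧ pvCell g i (j - 1) ≤ cur then false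
  else true

def index_out_of_bounds (g : List (List Int)) (i j : Int) : Bool :=
  -- len(all_numbers[i]) is only reached (short-circuit) with i in range, where pyGetD is exact
  if i < 0 ∨ j < 0 ∨ i + 1 > (g.length : Int) ∨ j + 1 > PySem.List.len (PySem.List.pyGetD g i []) then true
  else false

def pvIsPartOfBasin (old cur : Int) : Bool :=
  if cur = 9 then false
  else if cur > old then true
  else false

-- all in-range (i, j) pairs of the grid; used only for the fuel/termination bounds of the two loops
def pvAllCells (g : List (List Int)) : List (Int × Int) :=
  (List.range g.length).flatMap (fun i => (List.range (g.getD i []).length).map (fun j => ((i : Int), (j : Int))))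

-- fuel for A's recursion: Python's recursion nests at most one level per newly visited cell,
-- so (number of cells + 1) levels are never exhausted (proved via pvSim below)
def pvFuel (g : List (List Int)) : Nat := (pvAllCells g).length + 1

def pvExploreRec (g : List (List Int)) : Nat → Int → Int → Int → PySem.Set (Int × Int) → PySem.Set (Int × Int)
  | 0, _, _, _, visited => visited
  | fuel + 1, old, i, j, visited =>
    if index_out_of_bounds g i j || !pvIsPartOfBasin old (pvCell g i j) || PySem.Set.contains visited (i, j) then
      visited
    else
      let cur := pvCell g i j
      let v0 := PySem.Set.add visited (i, j)
      let v1 := pvExploreRec g fuel cur (i + 1) j v0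
      let v2 := pvExploreRec g fuel cur (i - 1) j v1
      let v3 := pvExploreRec g fuel cur i (j + 1) v2
      pvExploreRec g fuel cur i (j - 1) v3

def explore_for_basis (all_numbers : List (List Int)) : Int :=
  let low_points := (PySem.List.pyRange 0 (all_numbers.length : Int) 1).flatMap (fun i =>
    ((PySem.List.pyRange 0 (PySem.List.len (PySem.List.pyGetD all_numbers 0 [])) 1).filter
      (fun j => check_adjacent_numbers all_numbers i j)).map (fun j => (i, j)))
  let results := low_points.foldl (fun acc lp =>
    let cur := pvCell all_numbers lp.1 lp.2
    let v0 : PySem.Set (Int × Int) := PySem.Set.ofList [lp]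
    let v1 := pvExploreRec all_numbers (pvFuel all_numbers) cur (lp.1 + 1) lp.2 v0
    let v2 := pvExploreRec all_numbers (pvFuel all_numbers) cur (lp.1 - 1) lp.2 v1
    let v3 := pvExploreRec all_numbers (pvFuel all_numbers) cur lp.1 (lp.2 + 1) v2
    let v4 := pvExploreRec all_numbers (pvFuel all_numbers) cur lp.1 (lp.2 - 1) v3
    acc ++ [(v4.length : Int)]) []
  match PySem.List.slice (PySem.List.sorted results (fun x => x) false) (some (-3)) none with
  | [] => 0   -- unreachable under Pre_: Python's reduce raises TypeError on an empty sequence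
  | x :: xs => xs.foldl (fun acc y => acc * y) x

-- ===== PORT B =====
-- number of in-range cells not yet visited: the termination measure of B's stack loop
def pvUnvis (g : List (List Int)) (v : PySem.Set (Int × Int)) : Nat :=
  (pvAllCells g).countP (fun c => !PySem.Set.contains v c)

-- termination helper lemmas for pvFloodLoop (cited by its decreasing_by)
theorem pvCountP_lt_of_witness {α : Type} (l : List α) (p q : α → Bool)
    (himp : ∀ a, p a = true → q a = true) (x : α) (hx : x ∈ l)
    (hq : q x = true) (hp : p x = false) : l.countP p < l.countP q := by
  induction l with
  | nil => cases hx
  | cons a t ih =>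
    rw [List.countP_cons, List.countP_cons]
    rcases List.mem_cons.mp hx with rfl | hxt
    · have hle : t.countP p ≤ t.countP q := List.countP_mono_left (fun b _ hb => himp b hb)
      rw [hp, hq]
      norm_num
      omega
    · have hlt := ih hxt
      by_cases hpa : p a = true
      · rw [hpa, himp a hpa]; omega
      · rw [Bool.not_eq_true] at hpa
        rw [hpa]
        norm_num
        omega

theorem pvMem_allCells (g : List (List Int)) (x y : Int)
    (h : index_out_of_bounds g x y = false) : (x, y) ∈ pvAllCells g := by
  unfold index_out_of_bounds at h
  simp at h
  obtain ⟨hx0, hy0, hxl, hyl⟩ := h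
  have hxlt : x.toNat < g.length := by omega
  have hrow : PySem.List.pyGetD g x [] = g[x.toNat] :=
    PySem.List.pyGetD_eq_getElem g [] hx0 (by exact_mod_cast hxl)
  rw [hrow] at hyl
  have hylt : y.toNat < g[x.toNat].length := by omega
  have hjlt : y.toNat < (g.getD x.toNat []).length := by
    rw [List.getD_eq_getElem?_getD, List.getElem?_eq_getElem hxlt]
    simp only [Option.getD_some]
    omega
  have hmm : ((x.toNat : Int), (y.toNat : Int)) ∈ pvAllCells g := by
    unfold pvAllCells
    have h2 : ((x.toNat : Int), (y.toNat : Int)) ∈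
        (List.range (g.getD x.toNat []).length).map (fun j => ((x.toNat : Int), (j : Int))) := by
      apply List.mem_map_of_mem
      simp
      exact ⟨y.toNat, by simpa using hjlt, by omega⟩
    exact List.mem_flatMap.mpr ⟨x.toNat, List.mem_range.mpr hxlt, h2⟩
  rwa [Int.toNat_of_nonneg hx0, Int.toNat_of_nonneg hy0] at hmm

theorem pvUnvis_add_lt (g : List (List Int)) (v : PySem.Set (Int × Int)) (x y : Int)
    (hoob : index_out_of_bounds g x y = false)
    (hmem : PySem.Set.contains v (x, y) = false) :
    pvUnvis g (PySem.Set.add v (x, y)) < pvUnvis g v := by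
  apply pvCountP_lt_of_witness _ _ _ ?_ (x, y) (pvMem_allCells g x y hoob)
  · rw [hmem]
    rfl
  · simp [PySem.Set.mem_add]
  · intro a ha
    simp only [Bool.not_eq_true', ← Bool.not_eq_true] at ha ⊢
    intro hav
    exact ha (by simp [PySem.Set.mem_add] at hav ⊢; tauto)

def pvFloodLoop (g : List (List Int)) (stack : List ((Int × Int) × Int))
    (visited : PySem.Set (Int × Int)) : PySem.Set (Int × Int) :=
  match stack with
  | [] => visited
  | ((x, y), old) :: rest =>
    if hoob : index_out_of_bounds g x y then pvFloodLoop g rest visited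
    else
      let cur := pvCell g x y
      if hskip : cur = 9 ∨ cur ≤ old ∨ PySem.Set.contains visited (x, y) then pvFloodLoop g rest visited
      else
        pvFloodLoop g (((x + 1, y), cur) :: ((x - 1, y), cur) :: ((x, y + 1), cur) :: ((x, y - 1), cur) :: rest)
          (PySem.Set.add visited (x, y))
termination_by stack.length + 4 * pvUnvis g visited
decreasing_by
  · simp
  · simp
  · have hmem : PySem.Set.contains visited (x, y) = false := by
      rcases Bool.eq_false_or_eq_true (PySem.Set.contains visited (x, y)) with h | h
      · exact absurd (show cur = 9 ∨ cur ≤ old ∨ PySem.Set.contains visited (x, y) = true from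
          Or.inr (Or.inr h)) hskip
      · exact h
    have := pvUnvis_add_lt g visited x y (by simpa using hoob) hmem
    simp only [List.length_cons]
    omega

def explore_for_basis_alt (all_numbers : List (List Int)) : Int :=
  let low_points := (PySem.List.pyRange 0 (all_numbers.length : Int) 1).flatMap (fun i =>
    ((PySem.List.pyRange 0 (PySem.List.len (PySem.List.pyGetD all_numbers 0 [])) 1).filter
      (fun j => check_adjacent_numbers all_numbers i j)).map (fun j => (i, j)))
  let results := low_points.foldl (fun acc lp =>
    let low_value := pvCell all_numbers lp.1 lp.2
    -- the stack's top is the HEAD of the list: Python pushes in reverse and pops from the end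
    let visited := pvFloodLoop all_numbers
      [((lp.1 + 1, lp.2), low_value), ((lp.1 - 1, lp.2), low_value),
       ((lp.1, lp.2 + 1), low_value), ((lp.1, lp.2 - 1), low_value)]
      (PySem.Set.ofList [lp])
    acc ++ [(visited.length : Int)]) []
  match PySem.List.slice (PySem.List.sorted results (fun x => x) false) (some (-3)) none with
  | [] => 0   -- unreachable under Pre_
  | x :: xs => xs.foldl (fun acc y => acc * y) x

-- ===== PRECONDITION & SPEC =====
-- helpers for Pre_ (independent of the ports): the value and the low-point test at Nat coordinates
def pvVal (g : List (List Int)) (i j : Nat) : Int := (g.getD i []).getD j 0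

def pvLowN (g : List (List Int)) (i j : Nat) : Bool :=
  let cur := pvVal g i j
  !(decide (i + 2 ≤ g.length) && decide (pvVal g (i + 1) j ≤ cur)) &&
  !(decide (0 < i) && decide (pvVal g (i - 1) j ≤ cur)) &&
  !(decide (j + 2 ≤ (g.getD i []).length) && decide (pvVal g i (j + 1) ≤ cur)) &&
  !(decide (0 < j) && decide (pvVal g i (j - 1) ≤ cur))

-- Pre_ = exactly the inputs where Python A returns: every row at least as long as row 0 (else the
-- comprehension hits an IndexError) and at least one low point (else functools.reduce raises TypeError)
def Pre_explore_for_basis (all_numbers : List (List Int)) : Prop :=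
  (∀ row ∈ all_numbers, (all_numbers.headD []).length ≤ row.length) ∧
  ((List.range all_numbers.length).any (fun i =>
    (List.range (all_numbers.headD []).length).any (fun j => pvLowN all_numbers i j)) = true)
instance (all_numbers : List (List Int)) : Decidable (Pre_explore_for_basis all_numbers) := by
  unfold Pre_explore_for_basis; infer_instance

def pvWitness_explore_for_basis : List (List Int) := [[1, 2], [2, 3]]

def Spec_explore_for_basis (all_numbers : List (List Int)) (out : Int) : Prop := out = explore_for_basis_alt all_numbers
instance (all_numbers : List (List Int)) (out : Int) : Decidable (Spec_explore_for_basis all_numbers out) := by unfold Spec_explore_for_basis; infer_instance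

-- ===== CLAIM (what is proved, stated in full; the proofs are below) =====
def Claim_equal_explore_for_basis : Prop := ∀ (all_numbers : List (List Int)), Dom_explore_for_basis all_numbers → Pre_explore_for_basis all_numbers → Spec_explore_for_basis all_numbers (explore_for_basis all_numbers)

-- ===== LEMMAS AND PROOFS =====

-- every element of the visited set survives A's recursion
theorem pvExploreRec_mono (g : List (List Int)) :
    ∀ (fuel : Nat) (old i j : Int) (v : PySem.Set (Int × Int)) (c : Int × Int),
      c ∈ v → c ∈ pvExploreRec g fuel old i j v := by
  intro fuel
  induction fuel with
  | zero => intro old i j v c hc; simpa [pvExploreRec] using hc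
  | succ n ih =>
    intro old i j v c hc
    rw [pvExploreRec]
    split
    · exact hc
    · exact ih _ _ _ _ _ (ih _ _ _ _ _ (ih _ _ _ _ _ (ih _ _ _ _ _
        (by simp [PySem.Set.mem_add]; tauto))))

theorem pvUnvis_mono (g : List (List Int)) (v w : PySem.Set (Int × Int))
    (h : ∀ c, c ∈ v → c ∈ w) : pvUnvis g w ≤ pvUnvis g v := by
  apply List.countP_mono_left
  intro a _ ha
  simp only [Bool.not_eq_true', ← Bool.not_eq_true] at ha ⊢
  intro hav
  exact ha (by simp at hav ⊢; exact h a hav)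

theorem pvUnvis_le (g : List (List Int)) (v : PySem.Set (Int × Int)) :
    pvUnvis g v ≤ (pvAllCells g).length := List.countP_le_length

-- unfolding equations for the two loops
theorem pvExploreRec_succ_skip (g : List (List Int)) (fuel : Nat) (old x y : Int)
    (v : PySem.Set (Int × Int))
    (hg : (index_out_of_bounds g x y || !pvIsPartOfBasin old (pvCell g x y) ||
      PySem.Set.contains v (x, y)) = true) :
    pvExploreRec g (fuel + 1) old x y v = v := by
  rw [pvExploreRec, if_pos hg]

theorem pvExploreRec_succ_add (g : List (List Int)) (fuel : Nat) (old x y : Int)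
    (v : PySem.Set (Int × Int))
    (hg : (index_out_of_bounds g x y || !pvIsPartOfBasin old (pvCell g x y) ||
      PySem.Set.contains v (x, y)) = false) :
    pvExploreRec g (fuel + 1) old x y v =
      pvExploreRec g fuel (pvCell g x y) x (y - 1)
        (pvExploreRec g fuel (pvCell g x y) x (y + 1)
          (pvExploreRec g fuel (pvCell g x y) (x - 1) y
            (pvExploreRec g fuel (pvCell g x y) (x + 1) y
              (PySem.Set.add v (x, y))))) := by
  rw [pvExploreRec, if_neg (by simp only [hg]; decide)]

theorem pvFloodLoop_nil (g : List (List Int)) (v : PySem.Set (Int × Int)) :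
    pvFloodLoop g [] v = v := by
  rw [pvFloodLoop]

theorem pvFloodLoop_skip (g : List (List Int)) (x y old : Int) (rest : List ((Int × Int) × Int))
    (v : PySem.Set (Int × Int))
    (h : index_out_of_bounds g x y = true ∨
      (pvCell g x y = 9 ∨ pvCell g x y ≤ old ∨ PySem.Set.contains v (x, y) = true)) :
    pvFloodLoop g (((x, y), old) :: rest) v = pvFloodLoop g rest v := by
  rw [pvFloodLoop]
  by_cases hoob : index_out_of_bounds g x y = true
  · rw [dif_pos hoob]
  · rcases h with h | h
    · exact absurd h hoob
    · rw [dif_neg hoob]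
      simp only []
      rw [dif_pos h]

theorem pvFloodLoop_add (g : List (List Int)) (x y old : Int) (rest : List ((Int × Int) × Int))
    (v : PySem.Set (Int × Int))
    (hoob : index_out_of_bounds g x y = false)
    (h9 : ¬ pvCell g x y = 9) (hgt : ¬ pvCell g x y ≤ old)
    (hm : PySem.Set.contains v (x, y) = false) :
    pvFloodLoop g (((x, y), old) :: rest) v =
      pvFloodLoop g (((x + 1, y), pvCell g x y) :: ((x - 1, y), pvCell g x y) ::
        ((x, y + 1), pvCell g x y) :: ((x, y - 1), pvCell g x y) :: rest)
        (PySem.Set.add v (x, y)) := by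
  have hm' : (x, y) ∉ v := by
    intro hv
    have hc : PySem.Set.contains v (x, y) = true := (PySem.Set.contains_iff v (x, y)).mpr hv
    rw [hm] at hc
    exact Bool.false_ne_true hc
  rw [pvFloodLoop]
  rw [dif_neg (by simp only [hoob]; decide)]
  simp only []
  rw [dif_neg (by simp [h9, hgt, hm'])]

-- A's guard, read as B's skip condition
theorem pvGuard_cases (g : List (List Int)) (old x y : Int) (v : PySem.Set (Int × Int))
    (hg : (index_out_of_bounds g x y || !pvIsPartOfBasin old (pvCell g x y) ||
      PySem.Set.contains v (x, y)) = true) :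
    index_out_of_bounds g x y = true ∨
      (pvCell g x y = 9 ∨ pvCell g x y ≤ old ∨ PySem.Set.contains v (x, y) = true) := by
  simp only [Bool.or_eq_true, Bool.not_eq_true'] at hg
  rcases hg with (h | h) | h
  · exact Or.inl h
  · refine Or.inr ?_
    unfold pvIsPartOfBasin at h
    by_cases h9 : pvCell g x y = 9
    · exact Or.inl h9
    · simp [h9] at h
      right; left; omega
  · exact Or.inr (Or.inr (Or.inr h))

-- the simulation: one stack frame processed by B's loop is one call of A's recursion
theorem pvSim (g : List (List Int)) :
    ∀ (n : Nat) (v : PySem.Set (Int × Int)) (old x y : Int) (rest : List ((Int × Int) × Int)),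
      pvUnvis g v ≤ n →
      pvFloodLoop g (((x, y), old) :: rest) v = pvFloodLoop g rest (pvExploreRec g (n + 1) old x y v) := by
  intro n
  induction n with
  | zero =>
    intro v old x y rest hn
    by_cases hg : (index_out_of_bounds g x y || !pvIsPartOfBasin old (pvCell g x y) ||
        PySem.Set.contains v (x, y)) = true
    · rw [pvExploreRec_succ_skip g 0 old x y v hg, pvFloodLoop_skip]
      exact pvGuard_cases g old x y v hg
    · -- impossible with pvUnvis g v = 0: (x, y) would be an unvisited in-range cell
      exfalso
      rw [Bool.not_eq_true] at hg
      simp only [Bool.or_eq_false_iff] at hg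
      obtain ⟨⟨hoob, _⟩, hmem⟩ := hg
      have hlt := pvUnvis_add_lt g v x y hoob hmem
      omega
  | succ n ih =>
    intro v old x y rest hn
    by_cases hg : (index_out_of_bounds g x y || !pvIsPartOfBasin old (pvCell g x y) ||
        PySem.Set.contains v (x, y)) = true
    · rw [pvExploreRec_succ_skip g (n + 1) old x y v hg, pvFloodLoop_skip]
      exact pvGuard_cases g old x y v hg
    · rw [Bool.not_eq_true] at hg
      rw [pvExploreRec_succ_add g (n + 1) old x y v hg]
      simp only [Bool.or_eq_false_iff] at hg
      obtain ⟨⟨hoob, hbasin⟩, hmem⟩ := hg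
      have h9 : ¬ pvCell g x y = 9 := by
        intro h; unfold pvIsPartOfBasin at hbasin; simp [h] at hbasin
      have hgt : ¬ pvCell g x y ≤ old := by
        intro h
        unfold pvIsPartOfBasin at hbasin
        simp [h9] at hbasin
        omega
      rw [pvFloodLoop_add g x y old rest v hoob h9 hgt hmem]
      have hlt := pvUnvis_add_lt g v x y hoob hmem
      have h0 : pvUnvis g (PySem.Set.add v (x, y)) ≤ n := by omega
      set cur := pvCell g x y with hcur
      set w0 := PySem.Set.add v (x, y) with hw0
      rw [ih w0 cur (x + 1) y _ h0]
      set w1 := pvExploreRec g (n + 1) cur (x + 1) y w0 with hw1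
      have m1 : pvUnvis g w1 ≤ n :=
        le_trans (pvUnvis_mono g w0 w1 (fun c hc => pvExploreRec_mono g _ _ _ _ _ _ hc)) h0
      rw [ih w1 cur (x - 1) y _ m1]
      set w2 := pvExploreRec g (n + 1) cur (x - 1) y w1 with hw2
      have m2 : pvUnvis g w2 ≤ n :=
        le_trans (pvUnvis_mono g w1 w2 (fun c hc => pvExploreRec_mono g _ _ _ _ _ _ hc)) m1
      rw [ih w2 cur x (y + 1) _ m2]
      set w3 := pvExploreRec g (n + 1) cur x (y + 1) w2 with hw3
      have m3 : pvUnvis g w3 ≤ n :=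
        le_trans (pvUnvis_mono g w2 w3 (fun c hc => pvExploreRec_mono g _ _ _ _ _ _ hc)) m2
      rw [ih w3 cur x (y - 1) rest m3]

-- per low point: A's four seeded recursive calls compute B's flood fill
theorem pvPoint (g : List (List Int)) (lp : Int × Int) :
    pvExploreRec g (pvFuel g) (pvCell g lp.1 lp.2) lp.1 (lp.2 - 1)
      (pvExploreRec g (pvFuel g) (pvCell g lp.1 lp.2) lp.1 (lp.2 + 1)
        (pvExploreRec g (pvFuel g) (pvCell g lp.1 lp.2) (lp.1 - 1) lp.2
          (pvExploreRec g (pvFuel g) (pvCell g lp.1 lp.2) (lp.1 + 1) lp.2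
            (PySem.Set.ofList [lp])))) =
    pvFloodLoop g
      [((lp.1 + 1, lp.2), pvCell g lp.1 lp.2), ((lp.1 - 1, lp.2), pvCell g lp.1 lp.2),
       ((lp.1, lp.2 + 1), pvCell g lp.1 lp.2), ((lp.1, lp.2 - 1), pvCell g lp.1 lp.2)]
      (PySem.Set.ofList [lp]) := by
  have hfuel : pvFuel g = (pvAllCells g).length + 1 := rfl
  rw [hfuel]
  rw [pvSim g _ _ _ _ _ _ (pvUnvis_le g _)]
  rw [pvSim g _ _ _ _ _ _ (pvUnvis_le g _)]
  rw [pvSim g _ _ _ _ _ _ (pvUnvis_le g _)]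
  rw [pvSim g _ _ _ _ _ _ (pvUnvis_le g _)]
  rw [pvFloodLoop_nil]

-- the two result-collecting loops agree on any list of low points
theorem pvFold_eq (g : List (List Int)) (lows : List (Int × Int)) (acc : List Int) :
    List.foldl (fun (acc : List Int) (lp : Int × Int) =>
      acc ++ [((pvExploreRec g (pvFuel g) (pvCell g lp.1 lp.2) lp.1 (lp.2 - 1)
        (pvExploreRec g (pvFuel g) (pvCell g lp.1 lp.2) lp.1 (lp.2 + 1)
          (pvExploreRec g (pvFuel g) (pvCell g lp.1 lp.2) (lp.1 - 1) lp.2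
            (pvExploreRec g (pvFuel g) (pvCell g lp.1 lp.2) (lp.1 + 1) lp.2
              (PySem.Set.ofList [lp]))))).length : Int)]) acc lows =
    List.foldl (fun (acc : List Int) (lp : Int × Int) =>
      acc ++ [((pvFloodLoop g
        [((lp.1 + 1, lp.2), pvCell g lp.1 lp.2), ((lp.1 - 1, lp.2), pvCell g lp.1 lp.2),
         ((lp.1, lp.2 + 1), pvCell g lp.1 lp.2), ((lp.1, lp.2 - 1), pvCell g lp.1 lp.2)]
        (PySem.Set.ofList [lp])).length : Int)]) acc lows := by
  apply PySem.List.foldl_congr_mem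
  intro a lp _
  rw [pvPoint g lp]

-- ===== VERDICT (by name: the statement is the Claim_ definition above) =====
theorem explore_for_basis_spec : Claim_equal_explore_for_basis := by
  intro g _ _
  unfold Spec_explore_for_basis explore_for_basis explore_for_basis_alt
  simp only []
  rw [pvFold_eq]
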